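-- pv_equiv track=rewrite | github.com/fabio-ge/py_tutorials | monte_carlo_estimation.py | bs_with_trials
-- ===== SOURCE A (Python) =====
-- def bs_with_trials(ar,val):
-- 	trials = 0
-- 	lower,upper = (0,len(ar)-1)
-- 	while lower <= upper:
-- 		mid = lower + (upper -lower)//2
-- 		trials += 1
-- 		if ar[mid] == val:
-- 			return trials
-- 		elif ar[mid] > val:
-- 			upper = mid - 1
-- 		else:
-- 			lower = mid + 1
-- 	## I know in advance that the number is present, so this part is unreachable
-- 	return trials
-- ===== SOURCE B (Python) =====
-- def bs_with_trials(ar, val):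
--     # Recursive binary search on an (offset, size) window, counting comparisons.
--     def go(lo, size, trials):
--         if size == 0:
--             return trials
--         half = (size - 1) // 2
--         x = ar[lo + half]
--         trials += 1
--         if x == val:
--             return trials
--         if x > val:
--             return go(lo, half, trials)
--         return go(lo + half + 1, size - half - 1, trials)
--     return go(0, len(ar), 0)
-- ===== Notes on version B (the rewrite author's own statement) =====
-- stated objective: alternative
-- what changed: The iterative lower/upper index-bound loop is replaced by a recursive binary search over an (offset, size) window with a trials accumulator, a different decomposition of the same search.
import Mathlib
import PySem

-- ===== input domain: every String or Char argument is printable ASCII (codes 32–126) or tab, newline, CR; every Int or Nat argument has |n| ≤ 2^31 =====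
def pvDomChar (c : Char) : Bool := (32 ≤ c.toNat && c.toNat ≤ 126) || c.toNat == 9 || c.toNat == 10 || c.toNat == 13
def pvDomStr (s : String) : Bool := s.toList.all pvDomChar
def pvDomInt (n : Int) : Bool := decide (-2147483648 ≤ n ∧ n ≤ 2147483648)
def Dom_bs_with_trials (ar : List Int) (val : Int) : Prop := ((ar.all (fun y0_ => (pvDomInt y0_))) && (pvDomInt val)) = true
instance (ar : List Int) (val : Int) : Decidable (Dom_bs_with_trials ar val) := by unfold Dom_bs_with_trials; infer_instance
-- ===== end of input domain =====

-- B replaces A's iterative lower/upper index-bound loop by a recursive binary search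
-- over an (offset, size) window with a trials accumulator (alternative decomposition,
-- same results).


-- ===== PORT A =====
-- A's while loop, with a fuel guard for totality (the interval width shrinks every
-- iteration, so fuel len+1 is never exhausted; proved in the lemmas below).
-- ar[mid] is always in range when called from bs_with_trials, so the `none`
-- (IndexError) branch of pyGet? is unreachable from the entry point.
def bsLoopA (ar : List Int) (val : Int) : Nat → Int → Int → Int → Int
  | 0, _, _, trials => trials
  | fuel + 1, lower, upper, trials =>
    if lower ≤ upper then
      let mid := lower + PySem.Int.floordiv (upper - lower) 2
      match PySem.List.pyGet? ar mid with
      | none => trials + 1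
      | some x =>
        if x = val then trials + 1
        else if x > val then bsLoopA ar val fuel lower (mid - 1) (trials + 1)
        else bsLoopA ar val fuel (mid + 1) upper (trials + 1)
    else trials

def bs_with_trials (ar : List Int) (val : Int) : Int :=
  bsLoopA ar val (ar.length + 1) 0 ((ar.length : Int) - 1) 0

-- ===== PORT B =====
-- Source B's recursive `go` on an (offset, size) window; recursion is well-founded on
-- size (each call strictly shrinks the window), so no fuel is needed. ar[lo+half]
-- is ported by getElem? (the index is a nonnegative Nat, where it agrees with
-- Python's indexing); the `none` branch (IndexError in Python) is unreachable
-- from the entry point, which keeps the window inside the list.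
def bsGo (ar : List Int) (val : Int) : Nat → Nat → Int → Int
  | _, 0, trials => trials
  | lo, s + 1, trials =>
    let half := s / 2
    match ar[lo + half]? with
    | none => trials + 1
    | some x =>
      if x = val then trials + 1
      else if x > val then bsGo ar val lo half (trials + 1)
      else bsGo ar val (lo + half + 1) (s - half) (trials + 1)
  termination_by _ s _ => s
  decreasing_by all_goals omega

def bs_with_trials_alt (ar : List Int) (val : Int) : Int :=
  bsGo ar val 0 ar.length 0

-- ===== PRECONDITION & SPEC =====
def Spec_bs_with_trials (ar : List Int) (val : Int) (out : Int) : Prop := out = bs_with_trials_alt ar val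
instance (ar : List Int) (val : Int) (out : Int) : Decidable (Spec_bs_with_trials ar val out) := by unfold Spec_bs_with_trials; infer_instance

-- ===== CLAIM (what is proved, stated in full; the proofs are below) =====
def Claim_equal_bs_with_trials : Prop := ∀ (ar : List Int) (val : Int), Dom_bs_with_trials ar val → Spec_bs_with_trials ar val (bs_with_trials ar val)

-- ===== LEMMAS AND PROOFS =====

-- A's loop on the bounds [lo, lo+size-1] equals B's recursion on the window
-- (lo, size), for any fuel exceeding the window size.
theorem bsLoopA_eq_bsGo (ar : List Int) (val : Int) :
    ∀ (size fA lo : Nat) (trials : Int), size < fA →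
      bsLoopA ar val fA (lo : Int) ((lo : Int) + (size : Int) - 1) trials
        = bsGo ar val lo size trials := by
  intro size
  induction size using Nat.strong_induction_on with
  | _ size ih =>
    intro fA lo trials hf
    obtain ⟨a, rfl⟩ : ∃ a, fA = a + 1 := ⟨fA - 1, by omega⟩
    match size with
    | 0 =>
      rw [bsLoopA, bsGo]
      simp only [if_neg (by push_cast; omega : ¬ ((lo : Int) ≤ (lo : Int) + (0:Nat) - 1))]
    | s + 1 =>
      have hle : (lo : Int) ≤ (lo : Int) + ((s+1 : Nat) : Int) - 1 := by push_cast; omega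
      have hfd : PySem.Int.floordiv ((lo : Int) + ((s+1 : Nat) : Int) - 1 - (lo : Int)) 2
          = ((s : Int) / 2) := by
        rw [PySem.Int.floordiv_eq_ediv_of_pos (by omega)]; push_cast; ring_nf
      have hmid : (lo : Int) + (s : Int) / 2 = ((lo + s / 2 : Nat) : Int) := by
        push_cast; omega
      rw [bsLoopA, bsGo]
      simp only [if_pos hle, hfd, hmid, PySem.List.pyGet?_natCast]
      cases hg : ar[lo + s / 2]? with
      | none => rfl
      | some x =>
        by_cases hxv : x = val
        · simp [hxv]
        · simp only [if_neg hxv]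
          by_cases hgt : x > val
          · simp only [if_pos hgt]
            have := ih (s / 2) (by omega) a lo (trials + 1) (by omega)
            rw [← this]; congr 1
          · simp only [if_neg hgt]
            have := ih (s - s / 2) (by omega) a (lo + s / 2 + 1) (trials + 1) (by omega)
            rw [← this]; congr 1; push_cast; omega

-- ===== VERDICT (by name: the statement is the Claim_ definition above) =====
theorem bs_with_trials_spec : Claim_equal_bs_with_trials := by
  intro ar val _
  unfold Spec_bs_with_trials bs_with_trials bs_with_trials_alt
  have := bsLoopA_eq_bsGo ar val ar.length (ar.length + 1) 0 0 (by omega)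
  simpa using this
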